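-- pv_equiv track=rewrite | github.com/MrBrantCode/unitest_baseline | mut_generate/mist_train_cf/cf_96973/solution.py | remove_and_count_chars
-- ===== SOURCE A (Python) =====
-- def remove_and_count_chars(input_string):
--     # Initialize count variables
--     count_a = 0
--     count_b = 0
--     count_c = 0
--
--     # Count the occurrences of characters 'a', 'b', and 'c' in the original string
--     for char in input_string:
--         if char == 'a':
--             count_a += 1
--         elif char == 'b':
--             count_b += 1
--         elif char == 'c':
--             count_c += 1
--
--     # Remove characters 'a', 'b', and 'c' from the string
--     modified_string = input_string.replace('a', '').replace('b', '').replace('c', '')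
--
--     return modified_string, count_a, count_b, count_c
-- ===== SOURCE B (Python) =====
-- def remove_and_count_chars(input_string):
--     # One pass: count 'a','b','c' and collect the remaining characters as we go.
--     count_a = 0
--     count_b = 0
--     count_c = 0
--     result = []
--     for char in input_string:
--         if char == 'a':
--             count_a += 1
--         elif char == 'b':
--             count_b += 1
--         elif char == 'c':
--             count_c += 1
--         else:
--             result.append(char)
--     modified_string = ''.join(result)
--     return modified_string, count_a, count_b, count_c
-- ===== Notes on version B (the rewrite author's own statement) =====
-- stated objective: simpler
-- what changed: A counts in one loop and then removes via three chained str.replace passes; B does everything in a single pass, incrementing counters and collecting kept characters into one result list joined at the end.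
import Mathlib
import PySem

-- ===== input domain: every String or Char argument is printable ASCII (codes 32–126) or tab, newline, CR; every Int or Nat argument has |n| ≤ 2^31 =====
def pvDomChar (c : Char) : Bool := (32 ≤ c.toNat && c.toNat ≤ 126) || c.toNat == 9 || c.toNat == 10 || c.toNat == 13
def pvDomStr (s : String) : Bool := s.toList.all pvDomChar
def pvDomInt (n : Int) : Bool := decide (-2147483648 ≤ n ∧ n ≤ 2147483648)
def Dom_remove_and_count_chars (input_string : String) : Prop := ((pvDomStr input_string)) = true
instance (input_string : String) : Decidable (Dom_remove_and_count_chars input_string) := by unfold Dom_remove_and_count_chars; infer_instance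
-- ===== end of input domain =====

-- B fuses A's count loop and three chained replace passes into one traversal collecting kept chars; objective: simpler.


-- ===== PORT A =====
-- A: count 'a','b','c' in one loop, then remove them with three chained replace calls.
def remove_and_count_chars (input_string : String) : String × Int × Int × Int :=
  let counts := input_string.toList.foldl
    (fun (st : Int × Int × Int) ch =>
      if ch = 'a' then (st.1 + 1, st.2.1, st.2.2)
      else if ch = 'b' then (st.1, st.2.1 + 1, st.2.2)
      else if ch = 'c' then (st.1, st.2.1, st.2.2 + 1)
      else st) (0, 0, 0)
  let modified_string :=
    PySem.Str.replace (PySem.Str.replace (PySem.Str.replace input_string "a" "") "b" "") "c" ""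
  (modified_string, counts.1, counts.2.1, counts.2.2)

-- ===== PORT B =====
-- B: single pass, counters plus a result list of kept characters, joined at the end.
def remove_and_count_chars_alt (input_string : String) : String × Int × Int × Int :=
  let st := input_string.toList.foldl
    (fun (st : List Char × Int × Int × Int) ch =>
      if ch = 'a' then (st.1, st.2.1 + 1, st.2.2.1, st.2.2.2)
      else if ch = 'b' then (st.1, st.2.1, st.2.2.1 + 1, st.2.2.2)
      else if ch = 'c' then (st.1, st.2.1, st.2.2.1, st.2.2.2 + 1)
      else (st.1 ++ [ch], st.2.1, st.2.2.1, st.2.2.2)) ([], 0, 0, 0)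
  (String.ofList st.1, st.2.1, st.2.2.1, st.2.2.2)

-- ===== PRECONDITION & SPEC =====
def Spec_remove_and_count_chars (input_string : String) (out : String × Int × Int × Int) : Prop := out = remove_and_count_chars_alt input_string
instance (input_string : String) (out : String × Int × Int × Int) : Decidable (Spec_remove_and_count_chars input_string out) := by unfold Spec_remove_and_count_chars; infer_instance

-- ===== CLAIM (what is proved, stated in full; the proofs are below) =====
def Claim_equal_remove_and_count_chars : Prop := ∀ (input_string : String), Dom_remove_and_count_chars input_string → Spec_remove_and_count_chars input_string (remove_and_count_chars input_string)

-- ===== LEMMAS AND PROOFS =====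

-- replace with a single-char pattern and empty replacement is a filter
theorem replace_go_single (x : Char) : ∀ (fuel : Nat) (l acc : List Char), l.length ≤ fuel →
    PySem.Chars.replace.go [x] [] fuel l acc = acc.reverse ++ l.filter (fun c => c ≠ x) := by
  intro fuel
  induction fuel with
  | zero =>
    intro l acc h
    have : l = [] := List.eq_nil_of_length_eq_zero (Nat.le_zero.mp h)
    subst this
    simp [PySem.Chars.replace.go]
  | succ n ih =>
    intro l acc h
    cases l with
    | nil => simp [PySem.Chars.replace.go]
    | cons c t =>
      by_cases hc : c = x
      · subst hc
        have hpre : [c].isPrefixOf (c :: t) = true := by simp [List.isPrefixOf]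
        simp only [PySem.Chars.replace.go, hpre, if_pos]
        rw [ih]
        · simp
        · simpa using Nat.le_of_succ_le_succ h
      · have hpre : [x].isPrefixOf (c :: t) = false := by
          simp [List.isPrefixOf]
          exact fun hx => hc hx.symm
        simp only [PySem.Chars.replace.go, hpre]
        rw [ih t (c :: acc) (by simpa using Nat.le_of_succ_le_succ h)]
        simp [hc, decide_not]

theorem replace_single (x : Char) (l : List Char) :
    PySem.Chars.replace l [x] [] = l.filter (fun c => c ≠ x) := by
  simp only [PySem.Chars.replace, List.isEmpty]
  exact replace_go_single x l.length l [] (le_refl _)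

-- A's count loop computes the three counts added to the starting state
theorem foldlA (l : List Char) : ∀ (a b c : Int),
    l.foldl (fun (st : Int × Int × Int) ch =>
      if ch = 'a' then (st.1 + 1, st.2.1, st.2.2)
      else if ch = 'b' then (st.1, st.2.1 + 1, st.2.2)
      else if ch = 'c' then (st.1, st.2.1, st.2.2 + 1)
      else st) (a, b, c)
    = (a + l.count 'a', b + l.count 'b', c + l.count 'c') := by
  induction l with
  | nil => intro a b c; simp
  | cons ch t ih =>
    intro a b c
    simp only [List.foldl_cons]
    by_cases h1 : ch = 'a'
    · subst h1; simp [ih, List.count_cons]; omega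
    · by_cases h2 : ch = 'b'
      · subst h2; simp [h1, ih, List.count_cons]; omega
      · by_cases h3 : ch = 'c'
        · subst h3; simp [h1, h2, ih, List.count_cons]; omega
        · simp [h1, h2, h3, ih, List.count_cons, Ne.symm h1, Ne.symm h2, Ne.symm h3]

-- B's loop computes the kept characters appended to the accumulator, plus the counts
theorem foldlB (l : List Char) : ∀ (acc : List Char) (a b c : Int),
    l.foldl (fun (st : List Char × Int × Int × Int) ch =>
      if ch = 'a' then (st.1, st.2.1 + 1, st.2.2.1, st.2.2.2)
      else if ch = 'b' then (st.1, st.2.1, st.2.2.1 + 1, st.2.2.2)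
      else if ch = 'c' then (st.1, st.2.1, st.2.2.1, st.2.2.2 + 1)
      else (st.1 ++ [ch], st.2.1, st.2.2.1, st.2.2.2)) (acc, a, b, c)
    = (acc ++ l.filter (fun ch => ch ≠ 'a' ∧ ch ≠ 'b' ∧ ch ≠ 'c'),
       a + l.count 'a', b + l.count 'b', c + l.count 'c') := by
  induction l with
  | nil => intro acc a b c; simp
  | cons ch t ih =>
    intro acc a b c
    simp only [List.foldl_cons]
    by_cases h1 : ch = 'a'
    · subst h1; simp [ih, List.count_cons]; omega
    · by_cases h2 : ch = 'b'
      · subst h2; simp [h1, ih, List.count_cons]; omega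
      · by_cases h3 : ch = 'c'
        · subst h3; simp [h1, h2, ih, List.count_cons]; omega
        · simp [h1, h2, h3, ih, List.count_cons, Ne.symm h1, Ne.symm h2, Ne.symm h3]

-- ===== VERDICT (by name: the statement is the Claim_ definition above) =====
theorem remove_and_count_chars_spec : Claim_equal_remove_and_count_chars := by
  intro s _
  show remove_and_count_chars s = remove_and_count_chars_alt s
  unfold remove_and_count_chars remove_and_count_chars_alt
  have ha : ("a" : String).toList = ['a'] := rfl
  have hb : ("b" : String).toList = ['b'] := rfl
  have hc : ("c" : String).toList = ['c'] := rfl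
  have he : ("" : String).toList = [] := rfl
  simp only [PySem.Str.replace, String.toList_ofList, ha, hb, hc, he, replace_single,
    foldlA, foldlB, List.filter_filter, List.nil_append]
  refine Prod.ext ?_ rfl
  simp only
  congr 1
  apply List.filter_congr
  intro c _
  by_cases h1 : c = 'a' <;> by_cases h2 : c = 'b' <;> by_cases h3 : c = 'c' <;>
    simp [h1, h2, h3]
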